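-- pv_equiv track=rewrite | github.com/SunwoongH/algorithm | Programmers/Level3/에어컨.py | solution
-- ===== SOURCE A (Python) =====
-- def is_valid(onboard, i, temperature, t1, t2):
--     return not (onboard[i] and not (t1 <= temperature <= t2))
--
-- def solution(temperature, t1, t2, a, b, onboard):
--     temperature += 10
--     t1 += 10
--     t2 += 10
--     dp = [[int(1e9) for _ in range(51)] for _ in range(len(onboard))]
--     dp[0][temperature] = 0
--
--     for i in range(len(onboard) - 1):
--         for j in range(51):
--             if dp[i][j] == int(1e9):
--                 continue
--             pos = None
--             if j < temperature:
--                 pos = j + 1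
--             elif j > temperature:
--                 pos = j - 1
--             else:
--                 pos = j
--             if is_valid(onboard, i + 1, pos, t1, t2):
--                 dp[i + 1][pos] = min(dp[i + 1][pos], dp[i][j])
--
--             for pos, cost in [(j + 1, a), (j - 1, a), (j, b)]:
--                 if 0 <= pos <= 50 and is_valid(onboard, i + 1, pos, t1, t2):
--                     dp[i + 1][pos] = min(dp[i + 1][pos], dp[i][j] + cost)
--
--     return min(dp[len(onboard) - 1])
-- ===== SOURCE B (Python) =====
-- def solution(temperature, t1, t2, a, b, onboard):
--     # Lazy top-down memoized evaluation of the prefix-cost function h(i, temp):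
--     # each cell pulls the min over its explicit predecessor edges; cells are
--     # computed on demand (DFS with an explicit stack + memo dict), so invalid /
--     # unreachable regions are never expanded, instead of A's eager push-DP table.
--     T = temperature + 10
--     lo = t1 + 10
--     hi = t2 + 10
--     INF = int(1e9)
--     n = len(onboard)
--
--     def edges(p):
--         # predecessor edges (source, cost), grouped by source p-1, p, p+1
--         e = []
--         if p - 1 >= 0:
--             if p <= T:
--                 e.append((p - 1, 0))   # free drift toward T
--             e.append((p - 1, a))
--         if p == T:
--             e.append((p, 0))           # drift = stay at T
--         e.append((p, b))
--         if p + 1 <= 50: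
--             if p >= T:
--                 e.append((p + 1, 0))   # free drift toward T
--             e.append((p + 1, a))
--         return e
--
--     memo = {}
--
--     def h(i0, p0):
--         stack = [(i0, p0)]
--         while stack:
--             i, p = stack[-1]
--             if (i, p) in memo:
--                 stack.pop()
--                 continue
--             if i == 0:
--                 memo[(i, p)] = 0 if p == T else INF
--                 stack.pop()
--                 continue
--             if onboard[i] and not (lo <= p <= hi):
--                 memo[(i, p)] = INF
--                 stack.pop()
--                 continue
--             pending = [s for s, _ in edges(p) if (i - 1, s) not in memo]
--             if pending:
--                 stack.extend((i - 1, s) for s in pending)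
--                 continue
--             vals = [memo[(i - 1, s)] + c for s, c in edges(p) if memo[(i - 1, s)] < INF]
--             memo[(i, p)] = min(vals + [INF])
--             stack.pop()
--         return memo[(i0, p0)]
--
--     return min(h(n - 1, p) for p in range(51))
-- ===== Notes on version B (the rewrite author's own statement) =====
-- stated objective: alternative
-- what changed: Replaces A's eager forward push-DP filling a full 2D table (every live source relaxes its successors in place) with a lazy top-down memoized evaluation of the prefix-cost function h(i,temp): cells are computed on demand by a DFS with an explicit stack and a memo dict, each cell pulling the min over its explicit predecessor edges, so invalid or never-demanded regions are not expanded.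
-- outside the precondition, e.g. on solution(-20, 0, 5, 1, 2, [0, 0]): A returns 0, B returns 1000000000; on solution(-20, 0, 5, 1, 2, [0, 1, 0]): A returns 1000000000, B returns 1000000000; on solution(45, 0, 5, 1, 2, [0, 0]): A raises IndexError, B returns 1000000000
import Mathlib
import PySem

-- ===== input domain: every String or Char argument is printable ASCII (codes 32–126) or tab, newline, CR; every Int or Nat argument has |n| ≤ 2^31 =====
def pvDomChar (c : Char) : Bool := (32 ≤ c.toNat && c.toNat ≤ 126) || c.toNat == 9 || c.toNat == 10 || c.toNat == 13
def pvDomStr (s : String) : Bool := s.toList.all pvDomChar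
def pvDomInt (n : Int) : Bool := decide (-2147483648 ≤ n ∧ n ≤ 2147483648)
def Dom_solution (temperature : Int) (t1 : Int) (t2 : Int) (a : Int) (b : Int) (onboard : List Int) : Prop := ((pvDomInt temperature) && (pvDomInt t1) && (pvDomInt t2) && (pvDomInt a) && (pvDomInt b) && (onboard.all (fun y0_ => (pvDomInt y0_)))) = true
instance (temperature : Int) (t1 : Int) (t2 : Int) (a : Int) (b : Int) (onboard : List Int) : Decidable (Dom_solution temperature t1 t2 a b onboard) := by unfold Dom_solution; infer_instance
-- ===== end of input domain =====

-- B replaces A's eager forward push-DP over a full 2D table with a lazy top-down memoized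
-- evaluation of the prefix-cost function h(i,temp) (demand-driven, explicit stack + memo in
-- Python; the Lean port renders the same recursion on the time index with per-row sharing),
-- each cell pulling the min over its explicit predecessor edges.

def pvINF : Int := 1000000000

-- ===== PORT A =====
-- not (onboard[i] and not (t1 <= temperature <= t2))
def isValidA (onboard : List Int) (i : Int) (temp : Int) (t1 : Int) (t2 : Int) : Bool :=
  !(decide (PySem.List.pyGetD onboard i 0 ≠ 0) && !(decide (t1 ≤ temp) && decide (temp ≤ t2)))

-- the body of A's outer loop: build dp[i+1] from dp[i] by pushing from every live j
def stepA (onboard : List Int) (T : Int) (t1 : Int) (t2 : Int) (a : Int) (b : Int)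
    (i : Int) (cur : List Int) : List Int :=
  (PySem.List.pyRange 0 51 1).foldl (fun nxt j =>
    let cj := PySem.List.pyGetD cur j pvINF
    if cj = pvINF then nxt
    else
      let pos := if j < T then j + 1 else if T < j then j - 1 else j
      let nxt1 := if isValidA onboard (i+1) pos t1 t2
        then PySem.List.pySetD nxt pos (min (PySem.List.pyGetD nxt pos pvINF) cj)
        else nxt
      [(j+1, a), (j-1, a), (j, b)].foldl (fun n2 pc =>
        if 0 ≤ pc.1 ∧ pc.1 ≤ 50 ∧ isValidA onboard (i+1) pc.1 t1 t2 = true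
        then PySem.List.pySetD n2 pc.1 (min (PySem.List.pyGetD n2 pc.1 pvINF) (cj + pc.2))
        else n2) nxt1
  ) (List.replicate 51 pvINF)

def solution (temperature : Int) (t1 : Int) (t2 : Int) (a : Int) (b : Int) (onboard : List Int) : Int :=
  let T := temperature + 10
  let t1' := t1 + 10
  let t2' := t2 + 10
  let dp0 := PySem.List.pySetD (List.replicate 51 pvINF) T 0
  let last := (PySem.List.pyRange 0 ((onboard.length : Int) - 1) 1).foldl
      (fun cur i => stepA onboard T t1' t2' a b i cur) dp0
  (PySem.List.min? last (fun y => y)).getD 0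

-- ===== PORT B =====
-- one memo cell of B's h: pull the min over the explicit predecessor edges `edges(p)`
def cellB (onboard : List Int) (T : Int) (lo : Int) (hi : Int) (a : Int) (b : Int)
    (i : Int) (prev : List Int) (p : Int) : Int :=
  if PySem.List.pyGetD onboard i 0 ≠ 0 ∧ ¬(lo ≤ p ∧ p ≤ hi) then pvINF
  else
    let cands : List (Int × Int) :=
      (if 1 ≤ p then (if p ≤ T then [(p-1, (0:Int))] else []) ++ [(p-1, a)] else []) ++
      ((if p = T then [(p, (0:Int))] else []) ++ [(p, b)]) ++
      (if p ≤ 49 then (if T ≤ p then [(p+1, (0:Int))] else []) ++ [(p+1, a)] else [])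
    (PySem.List.min?
      ((cands.filterMap (fun sc =>
          if PySem.List.pyGetD prev sc.1 pvINF < pvINF
          then some (PySem.List.pyGetD prev sc.1 pvINF + sc.2) else none)) ++ [pvINF])
      (fun y => y)).getD 0

-- B's memoized h, rendered as recursion on the time index (one shared row per timestep)
def rowB (onboard : List Int) (T : Int) (lo : Int) (hi : Int) (a : Int) (b : Int) : Nat → List Int
  | 0 => (PySem.List.pyRange 0 51 1).map (fun p => if p = T then 0 else pvINF)
  | (i+1) => (PySem.List.pyRange 0 51 1).map
      (cellB onboard T lo hi a b ((i : Int) + 1) (rowB onboard T lo hi a b i))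

def solution_alt (temperature : Int) (t1 : Int) (t2 : Int) (a : Int) (b : Int) (onboard : List Int) : Int :=
  let T := temperature + 10
  let lo := t1 + 10
  let hi := t2 + 10
  (PySem.List.min? (rowB onboard T lo hi a b (onboard.length - 1)) (fun y => y)).getD 0

-- ===== PRECONDITION & SPEC =====
-- Pre_ excludes the empty passenger list and start temperatures outside the problem's stated
-- range -10..40: there A raises IndexError (onboard = [], temperature > 40 or < -61) or
-- returns an accidental value via Python negative-index wraparound into the 51-slot DP row
-- (-61 ≤ temperature ≤ -11).
def Pre_solution (temperature : Int) (t1 : Int) (t2 : Int) (a : Int) (b : Int) (onboard : List Int) : Prop :=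
  onboard ≠ [] ∧ -10 ≤ temperature ∧ temperature ≤ 40
instance (temperature : Int) (t1 : Int) (t2 : Int) (a : Int) (b : Int) (onboard : List Int) : Decidable (Pre_solution temperature t1 t2 a b onboard) := by unfold Pre_solution; infer_instance

def pvWitness_solution : Int × Int × Int × Int × Int × List Int := (23, 0, 5, 3, 1, [0, 1, 0])

def Spec_solution (temperature : Int) (t1 : Int) (t2 : Int) (a : Int) (b : Int) (onboard : List Int) (out : Int) : Prop := out = solution_alt temperature t1 t2 a b onboard
instance (temperature : Int) (t1 : Int) (t2 : Int) (a : Int) (b : Int) (onboard : List Int) (out : Int) : Decidable (Spec_solution temperature t1 t2 a b onboard out) := by unfold Spec_solution; infer_instance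

-- ===== CLAIM (what is proved, stated in full; the proofs are below) =====
def Claim_equal_solution : Prop := ∀ (temperature : Int) (t1 : Int) (t2 : Int) (a : Int) (b : Int) (onboard : List Int), Dom_solution temperature t1 t2 a b onboard → Pre_solution temperature t1 t2 a b onboard → Spec_solution temperature t1 t2 a b onboard (solution temperature t1 t2 a b onboard)

-- ===== LEMMAS AND PROOFS =====

-- pull form of one whole row, used to bridge rowB's recursion with stepA
def stepB (onboard : List Int) (T : Int) (lo : Int) (hi : Int) (a : Int) (b : Int)
    (i : Int) (prev : List Int) : List Int :=
  (PySem.List.pyRange 0 51 1).map (cellB onboard T lo hi a b i prev)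

lemma rowB_succ (onboard : List Int) (T lo hi a b : Int) (i : Nat) :
    rowB onboard T lo hi a b (i+1)
      = stepB onboard T lo hi a b ((i : Int) + 1) (rowB onboard T lo hi a b i) := rfl

-- generic: one conditional-min write
def pvUpd (r : List Int) (u : Int × Int) : List Int :=
  PySem.List.pySetD r u.1 (min (PySem.List.pyGetD r u.1 pvINF) u.2)

-- the contributions (target, candidate value) pushed by source cell j in A's inner loop
def pvContribs (onboard : List Int) (T : Int) (t1 : Int) (t2 : Int) (a : Int) (b : Int)
    (i : Int) (cur : List Int) (j : Int) : List (Int × Int) :=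
  let cj := PySem.List.pyGetD cur j pvINF
  if cj = pvINF then []
  else
    let pos := if j < T then j + 1 else if T < j then j - 1 else j
    (if isValidA onboard (i+1) pos t1 t2 then [(pos, cj)] else []) ++
    ((if 0 ≤ j+1 ∧ j+1 ≤ 50 ∧ isValidA onboard (i+1) (j+1) t1 t2 = true then [(j+1, cj + a)] else []) ++
     ((if 0 ≤ j-1 ∧ j-1 ≤ 50 ∧ isValidA onboard (i+1) (j-1) t1 t2 = true then [(j-1, cj + a)] else []) ++
      (if 0 ≤ j ∧ j ≤ 50 ∧ isValidA onboard (i+1) j t1 t2 = true then [(j, cj + b)] else [])))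

lemma getD_pvUpd (r : List Int) (k v p d : Int) (hk0 : 0 ≤ k) (hk : k < (r.length : Int))
    (hp0 : 0 ≤ p) (hp : p < (r.length : Int)) :
    PySem.List.pyGetD (PySem.List.pySetD r k v) p d = if p = k then v else PySem.List.pyGetD r p d := by
  rw [PySem.List.pySetD_of_nonneg r v hk0]
  rw [PySem.List.pyGetD_eq_getElem _ d hp0 (by simpa using hp),
      PySem.List.pyGetD_eq_getElem _ d hp0 hp]
  rw [List.getElem_set]
  by_cases h : p = k
  · have : k.toNat = p.toNat := by omega
    simp [h, this]
  · have : k.toNat ≠ p.toNat := by omega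
    simp [this, h]

lemma length_pvUpd (r : List Int) (u : Int × Int) : (pvUpd r u).length = r.length := by
  unfold pvUpd
  exact PySem.List.length_pySetD _ _ _

-- the inner body of stepA over one source j equals folding pvUpd over pvContribs
lemma foldl_pvUpd_if_singleton (c : Prop) [Decidable c] (x : Int × Int) (r : List Int) :
    (if c then [x] else []).foldl pvUpd r = if c then pvUpd r x else r := by
  by_cases h : c <;> simp [h]

set_option maxHeartbeats 1000000 in
lemma bodyA_eq (onboard : List Int) (T t1 t2 a b i : Int) (cur nxt : List Int) (j : Int) :
    (let cj := PySem.List.pyGetD cur j pvINF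
     if cj = pvINF then nxt
     else
       let pos := if j < T then j + 1 else if T < j then j - 1 else j
       let nxt1 := if isValidA onboard (i+1) pos t1 t2
         then PySem.List.pySetD nxt pos (min (PySem.List.pyGetD nxt pos pvINF) cj)
         else nxt
       [(j+1, a), (j-1, a), (j, b)].foldl (fun n2 pc =>
         if 0 ≤ pc.1 ∧ pc.1 ≤ 50 ∧ isValidA onboard (i+1) pc.1 t1 t2 = true
         then PySem.List.pySetD n2 pc.1 (min (PySem.List.pyGetD n2 pc.1 pvINF) (cj + pc.2))
         else n2) nxt1)
    = (pvContribs onboard T t1 t2 a b i cur j).foldl pvUpd nxt := by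
  unfold pvContribs
  dsimp only
  by_cases h : PySem.List.pyGetD cur j pvINF = pvINF
  · simp [h]
  · rw [if_neg h, if_neg h]
    rw [List.foldl_append, List.foldl_append, List.foldl_append]
    rw [foldl_pvUpd_if_singleton, foldl_pvUpd_if_singleton, foldl_pvUpd_if_singleton,
        foldl_pvUpd_if_singleton]
    rw [List.foldl_cons, List.foldl_cons, List.foldl_cons, List.foldl_nil]
    simp only [pvUpd]

lemma foldl_pvUpd_flatMap (l : List Int) (g : Int → List (Int × Int)) (init : List Int) :
    l.foldl (fun acc j => (g j).foldl pvUpd acc) init = (l.flatMap g).foldl pvUpd init := by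
  induction l generalizing init with
  | nil => rfl
  | cons x l ih => rw [List.foldl_cons, List.flatMap_cons, List.foldl_append, ih]

lemma stepA_eq_flatMap (onboard : List Int) (T t1 t2 a b i : Int) (cur : List Int) :
    stepA onboard T t1 t2 a b i cur
      = ((PySem.List.pyRange 0 51 1).flatMap (pvContribs onboard T t1 t2 a b i cur)).foldl
          pvUpd (List.replicate 51 pvINF) := by
  unfold stepA
  rw [← foldl_pvUpd_flatMap]
  exact PySem.List.foldl_congr_mem _ _ _ _
    (fun acc j _ => bodyA_eq onboard T t1 t2 a b i cur acc j)

lemma getD_foldl_pvUpd (us : List (Int × Int)) (r : List Int) (p : Int)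
    (hr : r.length = 51)
    (hus : ∀ u ∈ us, 0 ≤ u.1 ∧ u.1 < 51)
    (hp0 : 0 ≤ p) (hp : p < 51) :
    PySem.List.pyGetD (us.foldl pvUpd r) p pvINF
      = ((us.filter (fun u => decide (u.1 = p))).foldl (fun m u => min m u.2)
          (PySem.List.pyGetD r p pvINF)) := by
  induction us generalizing r with
  | nil => simp
  | cons u us ih =>
      obtain ⟨hu0, hu1⟩ := hus u (by simp)
      have step : PySem.List.pyGetD (pvUpd r u) p pvINF
          = if p = u.1 then min (PySem.List.pyGetD r u.1 pvINF) u.2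
            else PySem.List.pyGetD r p pvINF := by
        unfold pvUpd
        exact getD_pvUpd r u.1 _ p pvINF hu0 (by rw [hr]; exact_mod_cast hu1) hp0
          (by rw [hr]; exact_mod_cast hp)
      rw [List.foldl_cons,
          ih (pvUpd r u) (by rw [length_pvUpd, hr]) (fun v hv => hus v (by simp [hv]))]
      rw [step, List.filter_cons]
      by_cases h : u.1 = p
      · simp [h]
      · have h' : ¬ (p = u.1) := fun hc => h hc.symm
        simp [h, h']

lemma length_foldl_pvUpd (us : List (Int × Int)) (r : List Int) :
    (us.foldl pvUpd r).length = r.length := by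
  induction us generalizing r with
  | nil => rfl
  | cons u us ih => rw [List.foldl_cons, ih, length_pvUpd]

lemma mem_if_singleton {c : Prop} [Decidable c] {x u : Int × Int}
    (h : u ∈ (if c then [x] else [])) : c ∧ u = x := by
  split_ifs at h with hc
  · exact ⟨hc, by simpa using h⟩
  · simp at h

lemma pvContribs_target_valid (onboard : List Int) (T t1 t2 a b i : Int) (cur : List Int) (j : Int)
    (u : Int × Int) (hu : u ∈ pvContribs onboard T t1 t2 a b i cur j) :
    isValidA onboard (i+1) u.1 t1 t2 = true := by
  unfold pvContribs at hu
  dsimp only at hu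
  by_cases h : PySem.List.pyGetD cur j pvINF = pvINF
  · rw [if_pos h] at hu; simp at hu
  · rw [if_neg h] at hu
    rcases List.mem_append.mp hu with h1 | h23
    · obtain ⟨hc, rfl⟩ := mem_if_singleton h1; exact hc
    · rcases List.mem_append.mp h23 with h2 | h34
      · obtain ⟨hc, rfl⟩ := mem_if_singleton h2; exact hc.2.2
      · rcases List.mem_append.mp h34 with h3 | h4
        · obtain ⟨hc, rfl⟩ := mem_if_singleton h3; exact hc.2.2
        · obtain ⟨hc, rfl⟩ := mem_if_singleton h4; exact hc.2.2

lemma pvContribs_target_close (onboard : List Int) (T t1 t2 a b i : Int) (cur : List Int) (j : Int)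
    (u : Int × Int) (hu : u ∈ pvContribs onboard T t1 t2 a b i cur j) :
    j - 1 ≤ u.1 ∧ u.1 ≤ j + 1 := by
  unfold pvContribs at hu
  dsimp only at hu
  by_cases h : PySem.List.pyGetD cur j pvINF = pvINF
  · rw [if_pos h] at hu; simp at hu
  · rw [if_neg h] at hu
    rcases List.mem_append.mp hu with h1 | h23
    · obtain ⟨hc, rfl⟩ := mem_if_singleton h1
      dsimp only
      split_ifs <;> omega
    · rcases List.mem_append.mp h23 with h2 | h34
      · obtain ⟨hc, rfl⟩ := mem_if_singleton h2; dsimp only; omega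
      · rcases List.mem_append.mp h34 with h3 | h4
        · obtain ⟨hc, rfl⟩ := mem_if_singleton h3; dsimp only; omega
        · obtain ⟨hc, rfl⟩ := mem_if_singleton h4; dsimp only; omega

lemma pvContribs_target_bounds (onboard : List Int) (T t1 t2 a b i : Int) (cur : List Int) (j : Int)
    (hT0 : 0 ≤ T) (hT : T ≤ 50) (hj0 : 0 ≤ j) (hj : j ≤ 50)
    (u : Int × Int) (hu : u ∈ pvContribs onboard T t1 t2 a b i cur j) :
    0 ≤ u.1 ∧ u.1 < 51 := by
  unfold pvContribs at hu
  dsimp only at hu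
  by_cases h : PySem.List.pyGetD cur j pvINF = pvINF
  · rw [if_pos h] at hu; simp at hu
  · rw [if_neg h] at hu
    rcases List.mem_append.mp hu with h1 | h23
    · obtain ⟨hc, rfl⟩ := mem_if_singleton h1
      dsimp only
      split_ifs <;> omega
    · rcases List.mem_append.mp h23 with h2 | h34
      · obtain ⟨hc, rfl⟩ := mem_if_singleton h2
        exact ⟨hc.1, by have := hc.2.1; omega⟩
      · rcases List.mem_append.mp h34 with h3 | h4
        · obtain ⟨hc, rfl⟩ := mem_if_singleton h3
          exact ⟨hc.1, by have := hc.2.1; omega⟩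
        · obtain ⟨hc, rfl⟩ := mem_if_singleton h4
          exact ⟨hc.1, by have := hc.2.1; omega⟩

-- fold-min helpers
lemma foldl_min_min (t : List Int) (x y : Int) :
    t.foldl min (min x y) = min x (t.foldl min y) := by
  induction t generalizing y with
  | nil => rfl
  | cons c t ih =>
      rw [List.foldl_cons, List.foldl_cons, min_assoc, ih]

lemma foldl_min_le (t : List Int) (x : Int) : t.foldl min x ≤ x := by
  induction t generalizing x with
  | nil => simp
  | cons c t ih =>
      rw [List.foldl_cons]
      exact le_trans (ih _) (min_le_left _ _)

lemma min_append_INF (l : List Int) :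
    (PySem.List.min? (l ++ [pvINF]) (fun y => y)).getD 0 = l.foldl min pvINF := by
  cases l with
  | nil => simp [PySem.List.min?_id_cons]
  | cons v t =>
      rw [List.cons_append, PySem.List.min?_id_cons, Option.getD_some,
          List.foldl_append, List.foldl_cons, List.foldl_nil, List.foldl_cons]
      rw [foldl_min_min]
      rw [min_comm]

lemma filter_if_singleton (p : Int) (c : Prop) [Decidable c] (x : Int × Int) :
    List.filter (fun u => decide (u.1 = p)) (if c then [x] else [])
      = if c ∧ x.1 = p then [x] else [] := by
  by_cases hc : c
  · by_cases hx : x.1 = p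
    · simp [hc, hx]
    · simp [hc, hx]
  · simp [hc]

-- contributions from source p-1 that target p
lemma F_left (onboard : List Int) (T t1 t2 a b i : Int) (cur : List Int) (p : Int)
    (h1 : 1 ≤ p) (hp : p ≤ 50) (hval : isValidA onboard (i+1) p t1 t2 = true) :
    (pvContribs onboard T t1 t2 a b i cur (p-1)).filter (fun u => decide (u.1 = p))
      = if PySem.List.pyGetD cur (p-1) pvINF = pvINF then []
        else (if p ≤ T then [(p, PySem.List.pyGetD cur (p-1) pvINF)] else [])
             ++ [(p, PySem.List.pyGetD cur (p-1) pvINF + a)] := by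
  unfold pvContribs
  dsimp only
  by_cases hc : PySem.List.pyGetD cur (p-1) pvINF = pvINF
  · simp [hc]
  · rw [if_neg hc, if_neg hc]
    have e1 : p - 1 + 1 = p := by omega
    rw [e1]
    rw [List.filter_append, List.filter_append, List.filter_append,
        filter_if_singleton, filter_if_singleton, filter_if_singleton, filter_if_singleton]
    have hne1 : ¬ (p - 1 - 1 = p) := by omega
    have hne2 : ¬ (p - 1 = p) := by omega
    by_cases hT : p - 1 < T
    · have hT' : p ≤ T := by omega
      simp [hT, hT', hval, hne1, hne2, show (0:Int) ≤ p by omega, hp]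
    · have hT' : ¬ (p ≤ T) := by omega
      by_cases hT2 : T < p - 1
      · simp [hT, hT2, hT', hval, hne1, hne2, show (0:Int) ≤ p by omega, hp]
      · simp [hT, hT2, hT', hval, hne1, hne2, show (0:Int) ≤ p by omega, hp]

-- contributions from source p that target p
lemma F_mid (onboard : List Int) (T t1 t2 a b i : Int) (cur : List Int) (p : Int)
    (h0 : 0 ≤ p) (hp : p ≤ 50) (hval : isValidA onboard (i+1) p t1 t2 = true) :
    (pvContribs onboard T t1 t2 a b i cur p).filter (fun u => decide (u.1 = p))
      = if PySem.List.pyGetD cur p pvINF = pvINF then []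
        else (if p = T then [(p, PySem.List.pyGetD cur p pvINF)] else [])
             ++ [(p, PySem.List.pyGetD cur p pvINF + b)] := by
  unfold pvContribs
  dsimp only
  by_cases hc : PySem.List.pyGetD cur p pvINF = pvINF
  · simp [hc]
  · rw [if_neg hc, if_neg hc]
    rw [List.filter_append, List.filter_append, List.filter_append,
        filter_if_singleton, filter_if_singleton, filter_if_singleton, filter_if_singleton]
    have hne1 : ¬ (p + 1 = p) := by omega
    have hne2 : ¬ (p - 1 = p) := by omega
    by_cases hT : p < T
    · have hT' : ¬ (p = T) := by omega
      simp [hT, hT', hval, hne1, hne2, h0, hp]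
    · by_cases hT2 : T < p
      · have hT' : ¬ (p = T) := by omega
        simp [hT, hT2, hT', hval, hne1, hne2, h0, hp]
      · have hT' : p = T := by omega
        subst hT'
        simp [hval, hne1, hne2, h0, hp]

-- contributions from source p+1 that target p
lemma F_right (onboard : List Int) (T t1 t2 a b i : Int) (cur : List Int) (p : Int)
    (h0 : 0 ≤ p) (hp : p ≤ 49) (hval : isValidA onboard (i+1) p t1 t2 = true) :
    (pvContribs onboard T t1 t2 a b i cur (p+1)).filter (fun u => decide (u.1 = p))
      = if PySem.List.pyGetD cur (p+1) pvINF = pvINF then []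
        else (if T ≤ p then [(p, PySem.List.pyGetD cur (p+1) pvINF)] else [])
             ++ [(p, PySem.List.pyGetD cur (p+1) pvINF + a)] := by
  unfold pvContribs
  dsimp only
  by_cases hc : PySem.List.pyGetD cur (p+1) pvINF = pvINF
  · simp [hc]
  · rw [if_neg hc, if_neg hc]
    have e1 : p + 1 - 1 = p := by omega
    rw [e1]
    rw [List.filter_append, List.filter_append, List.filter_append,
        filter_if_singleton, filter_if_singleton, filter_if_singleton, filter_if_singleton]
    have hne1 : ¬ (p + 1 + 1 = p) := by omega
    have hne2 : ¬ (p + 1 = p) := by omega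
    have hp50 : p ≤ 50 := by omega
    by_cases hT : p + 1 < T
    · have hT' : ¬ (T ≤ p) := by omega
      simp [hT, hT', hval, hne1, hne2, h0, hp50]
    · by_cases hT2 : T < p + 1
      · have hT' : T ≤ p := by omega
        simp [hT, hT2, hT', hval, hne1, hne2, h0, hp50]
      · have hT' : ¬ (T ≤ p) := by omega
        simp [hT, hT2, hT', hval, hne1, hne2, h0, hp50]

-- only the three sources p-1, p, p+1 can target p
lemma flatMap_filter_local (onboard : List Int) (T t1 t2 a b i : Int) (cur : List Int) (p : Int)
    (hp0 : 0 ≤ p) (hp : p ≤ 50) :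
    ((PySem.List.pyRange 0 51 1).flatMap
        (fun j => (pvContribs onboard T t1 t2 a b i cur j).filter (fun u => decide (u.1 = p))))
      = (if 1 ≤ p then
            (pvContribs onboard T t1 t2 a b i cur (p-1)).filter (fun u => decide (u.1 = p))
          else [])
        ++ ((pvContribs onboard T t1 t2 a b i cur p).filter (fun u => decide (u.1 = p))
        ++ (if p ≤ 49 then
              (pvContribs onboard T t1 t2 a b i cur (p+1)).filter (fun u => decide (u.1 = p))
            else [])) := by
  have Fnil : ∀ j : Int, j < p - 1 ∨ p + 1 < j →
      (pvContribs onboard T t1 t2 a b i cur j).filter (fun u => decide (u.1 = p)) = [] := by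
    intro j hj
    rw [List.filter_eq_nil_iff]
    intro u hu
    have := pvContribs_target_close onboard T t1 t2 a b i cur j u hu
    simp only [decide_eq_true_eq]
    omega
  have hsplit : PySem.List.pyRange 0 51 1
      = PySem.List.pyRange 0 (max 0 (p-1)) 1
        ++ (PySem.List.pyRange (max 0 (p-1)) (min 51 (p+2)) 1
        ++ PySem.List.pyRange (min 51 (p+2)) 51 1) := by
    rw [← PySem.List.pyRange_one_append (max 0 (p-1)) (min 51 (p+2)) 51 (by omega) (by omega)]
    rw [← PySem.List.pyRange_one_append 0 (max 0 (p-1)) 51 (by omega) (by omega)]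
  rw [hsplit, List.flatMap_append, List.flatMap_append]
  have hnil1 : ((PySem.List.pyRange 0 (max 0 (p-1)) 1).flatMap
      (fun j => (pvContribs onboard T t1 t2 a b i cur j).filter (fun u => decide (u.1 = p)))) = [] := by
    rw [List.flatMap_eq_nil_iff]
    intro j hj
    rw [PySem.List.mem_pyRange_one] at hj
    exact Fnil j (by omega)
  have hnil2 : ((PySem.List.pyRange (min 51 (p+2)) 51 1).flatMap
      (fun j => (pvContribs onboard T t1 t2 a b i cur j).filter (fun u => decide (u.1 = p)))) = [] := by
    rw [List.flatMap_eq_nil_iff]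
    intro j hj
    rw [PySem.List.mem_pyRange_one] at hj
    exact Fnil j (by omega)
  rw [hnil1, hnil2, List.nil_append, List.append_nil]
  by_cases h1 : 1 ≤ p
  · rw [if_pos h1]
    by_cases h49 : p ≤ 49
    · rw [if_pos h49]
      have e1 : max 0 (p-1) = p - 1 := by omega
      have e2 : min 51 (p+2) = p + 2 := by omega
      rw [e1, e2,
          PySem.List.pyRange_one_cons (by omega : p - 1 < p + 2),
          PySem.List.pyRange_one_cons (by omega : p - 1 + 1 < p + 2),
          PySem.List.pyRange_one_cons (by omega : p - 1 + 1 + 1 < p + 2),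
          PySem.List.pyRange_one_eq_nil (by omega : p + 2 ≤ p - 1 + 1 + 1 + 1)]
      have e3 : p - 1 + 1 = p := by omega
      have e4 : p - 1 + 1 + 1 = p + 1 := by omega
      rw [e3] at *
      rw [e4]
      simp [List.flatMap_cons]
    · rw [if_neg h49]
      have e1 : max 0 (p-1) = p - 1 := by omega
      have e2 : min 51 (p+2) = 51 := by omega
      have e5 : p = 50 := by omega
      rw [e1, e2, e5,
          PySem.List.pyRange_one_cons (by omega : (50:Int) - 1 < 51),
          PySem.List.pyRange_one_cons (by omega : (50:Int) - 1 + 1 < 51),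
          PySem.List.pyRange_one_eq_nil (by omega : (51:Int) ≤ 50 - 1 + 1 + 1)]
      have e3 : (50:Int) - 1 + 1 = 50 := by omega
      rw [e3]
      simp [List.flatMap_cons]
  · rw [if_neg h1]
    have e5 : p = 0 := by omega
    have e1 : max 0 (p-1) = 0 := by omega
    have e2 : min 51 (p+2) = 2 := by omega
    rw [e1, e2, e5] at *
    rw [if_pos (by omega : (0:Int) ≤ 49)]
    rw [PySem.List.pyRange_one_cons (by omega : (0:Int) < 2),
        PySem.List.pyRange_one_cons (by omega : (0:Int) + 1 < 2),
        PySem.List.pyRange_one_eq_nil (by omega : (2:Int) ≤ 0 + 1 + 1)]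
    have e3 : (0:Int) + 1 = 1 := by omega
    rw [e3]
    simp [List.flatMap_cons]

-- the heart: one A-cell (push) equals one B-cell (pull)
lemma seg_eq (prev : List Int) (s p w : Int) (cond : Prop) [Decidable cond]
    (hx : PySem.List.pyGetD prev s pvINF ≤ pvINF) :
    ((if PySem.List.pyGetD prev s pvINF = pvINF then ([] : List (Int × Int))
      else (if cond then [(p, PySem.List.pyGetD prev s pvINF)] else [])
           ++ [(p, PySem.List.pyGetD prev s pvINF + w)]).map Prod.snd)
    = List.filterMap (fun sc : Int × Int =>
        if PySem.List.pyGetD prev sc.1 pvINF < pvINF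
        then some (PySem.List.pyGetD prev sc.1 pvINF + sc.2) else none)
        ((if cond then [(s, 0)] else []) ++ [(s, w)]) := by
  by_cases hinf : PySem.List.pyGetD prev s pvINF = pvINF
  · have hnl : ¬ PySem.List.pyGetD prev s pvINF < pvINF := by
      rw [hinf]; exact lt_irrefl _
    by_cases hcond : cond <;> simp [hinf, hcond, hnl]
  · have hlt : PySem.List.pyGetD prev s pvINF < pvINF := lt_of_le_of_ne hx hinf
    by_cases hcond : cond <;> simp [hinf, hcond, hlt]

lemma cell_eq (onboard : List Int) (T t1 t2 a b i : Int) (cur : List Int)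
    (hT0 : 0 ≤ T) (hT : T ≤ 50) (hlen : cur.length = 51)
    (hle : ∀ k : Int, 0 ≤ k → k < 51 → PySem.List.pyGetD cur k pvINF ≤ pvINF)
    (p : Int) (hp0 : 0 ≤ p) (hp : p ≤ 50) :
    PySem.List.pyGetD (stepA onboard T t1 t2 a b i cur) p pvINF
      = cellB onboard T (t1) (t2) a b (i+1) cur p := by
  have hflat : ∀ u ∈ (PySem.List.pyRange 0 51 1).flatMap (pvContribs onboard T t1 t2 a b i cur),
      0 ≤ u.1 ∧ u.1 < 51 := by
    intro u hu
    rw [List.mem_flatMap] at hu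
    obtain ⟨j, hj, hu⟩ := hu
    rw [PySem.List.mem_pyRange_one] at hj
    exact pvContribs_target_bounds onboard T t1 t2 a b i cur j hT0 hT hj.1 (by omega) u hu
  rw [stepA_eq_flatMap,
      getD_foldl_pvUpd _ _ _ (List.length_replicate) hflat hp0 (by omega)]
  have hinit : PySem.List.pyGetD (List.replicate 51 pvINF) p pvINF = pvINF := by
    rw [PySem.List.pyGetD_eq_getElem _ _ hp0 (by simp; omega)]
    rw [List.getElem_replicate]
  rw [hinit, List.filter_flatMap, flatMap_filter_local onboard T t1 t2 a b i cur p hp0 hp]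
  simp only [cellB]
  by_cases hv : PySem.List.pyGetD onboard (i+1) 0 ≠ 0 ∧ ¬(t1 ≤ p ∧ p ≤ t2)
  · rw [if_pos hv]
    have hval : isValidA onboard (i+1) p t1 t2 = false := by
      unfold isValidA
      have h2 := hv.2
      simp [hv.1]
      omega
    have hFnil : ∀ j : Int,
        (pvContribs onboard T t1 t2 a b i cur j).filter (fun u => decide (u.1 = p)) = [] := by
      intro j
      rw [List.filter_eq_nil_iff]
      intro u hu hup
      have hvv := pvContribs_target_valid onboard T t1 t2 a b i cur j u hu
      rw [decide_eq_true_eq] at hup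
      rw [hup, hval] at hvv
      exact absurd hvv (by simp)
    simp [hFnil]
  · rw [if_neg hv]
    have hval : isValidA onboard (i+1) p t1 t2 = true := by
      by_cases hx : PySem.List.pyGetD onboard (i+1) 0 = 0
      · simp [isValidA, hx]
      · have hr : t1 ≤ p ∧ p ≤ t2 := by tauto
        simp [isValidA, hx, hr.1, hr.2]
    rw [F_mid onboard T t1 t2 a b i cur p hp0 hp hval]
    rw [min_append_INF, ← List.foldl_map]
    congr 1
    by_cases h1 : 1 ≤ p
    · rw [if_pos h1, if_pos h1, F_left onboard T t1 t2 a b i cur p h1 hp hval]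
      by_cases h49 : p ≤ 49
      · rw [if_pos h49, if_pos h49, F_right onboard T t1 t2 a b i cur p hp0 h49 hval]
        rw [List.map_append, List.map_append]
        rw [seg_eq cur (p-1) p a (p ≤ T) (hle (p-1) (by omega) (by omega)),
            seg_eq cur p p b (p = T) (hle p (by omega) (by omega)),
            seg_eq cur (p+1) p a (T ≤ p) (hle (p+1) (by omega) (by omega))]
        simp only [List.filterMap_append, List.append_assoc, List.filterMap_nil,
          List.map_nil, List.nil_append, List.append_nil]
      · rw [if_neg h49, if_neg h49]
        rw [List.map_append, List.map_append]
        rw [seg_eq cur (p-1) p a (p ≤ T) (hle (p-1) (by omega) (by omega)),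
            seg_eq cur p p b (p = T) (hle p (by omega) (by omega))]
        simp only [List.filterMap_append, List.append_assoc, List.filterMap_nil,
          List.map_nil, List.nil_append, List.append_nil]
    · rw [if_neg h1, if_neg h1]
      by_cases h49 : p ≤ 49
      · rw [if_pos h49, if_pos h49, F_right onboard T t1 t2 a b i cur p hp0 h49 hval]
        rw [List.map_append, List.map_append]
        rw [seg_eq cur p p b (p = T) (hle p (by omega) (by omega)),
            seg_eq cur (p+1) p a (T ≤ p) (hle (p+1) (by omega) (by omega))]
        simp only [List.filterMap_append, List.append_assoc, List.filterMap_nil,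
          List.map_nil, List.nil_append, List.append_nil]
      · omega

lemma length_stepA (onboard : List Int) (T t1 t2 a b i : Int) (cur : List Int) :
    (stepA onboard T t1 t2 a b i cur).length = 51 := by
  rw [stepA_eq_flatMap, length_foldl_pvUpd, List.length_replicate]

lemma stepA_le (onboard : List Int) (T t1 t2 a b i : Int) (cur : List Int)
    (hT0 : 0 ≤ T) (hT : T ≤ 50)
    (p : Int) (hp0 : 0 ≤ p) (hp : p < 51) :
    PySem.List.pyGetD (stepA onboard T t1 t2 a b i cur) p pvINF ≤ pvINF := by
  have hflat : ∀ u ∈ (PySem.List.pyRange 0 51 1).flatMap (pvContribs onboard T t1 t2 a b i cur),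
      0 ≤ u.1 ∧ u.1 < 51 := by
    intro u hu
    rw [List.mem_flatMap] at hu
    obtain ⟨j, hj, hu⟩ := hu
    rw [PySem.List.mem_pyRange_one] at hj
    exact pvContribs_target_bounds onboard T t1 t2 a b i cur j hT0 hT hj.1 (by omega) u hu
  rw [stepA_eq_flatMap,
      getD_foldl_pvUpd _ _ _ (List.length_replicate) hflat hp0 hp]
  have hinit : PySem.List.pyGetD (List.replicate 51 pvINF) p pvINF = pvINF := by
    rw [PySem.List.pyGetD_eq_getElem _ _ hp0 (by simp; omega)]
    rw [List.getElem_replicate]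
  rw [hinit, ← List.foldl_map]
  exact foldl_min_le _ _

lemma step_eq (onboard : List Int) (T t1 t2 a b i : Int) (cur : List Int)
    (hT0 : 0 ≤ T) (hT : T ≤ 50) (hlen : cur.length = 51)
    (hle : ∀ k : Int, 0 ≤ k → k < 51 → PySem.List.pyGetD cur k pvINF ≤ pvINF) :
    stepA onboard T t1 t2 a b i cur = stepB onboard T t1 t2 a b (i+1) cur := by
  apply List.ext_getElem
  · rw [length_stepA]
    unfold stepB
    rw [List.length_map, PySem.List.length_pyRange_one]
    rfl
  · intro n h1 h2
    have hn : (n : Int) < 51 := by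
      rw [length_stepA] at h1; exact_mod_cast h1
    have e1 : (stepA onboard T t1 t2 a b i cur)[n]
        = PySem.List.pyGetD (stepA onboard T t1 t2 a b i cur) (n : Int) pvINF := by
      rw [PySem.List.pyGetD_eq_getElem _ _ (by omega) (by rw [length_stepA]; exact_mod_cast hn)]
      simp
    rw [e1, cell_eq onboard T t1 t2 a b i cur hT0 hT hlen hle (n : Int) (by omega) (by omega)]
    unfold stepB
    rw [List.getElem_map]
    congr 1
    rw [PySem.List.getElem_pyRange_one]
    simp

lemma row0_eq (T : Int) (hT0 : 0 ≤ T) (hT : T ≤ 50) :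
    PySem.List.pySetD (List.replicate 51 pvINF) T 0
      = (PySem.List.pyRange 0 51 1).map (fun p => if p = T then 0 else pvINF) := by
  apply List.ext_getElem
  · rw [PySem.List.length_pySetD, List.length_replicate, List.length_map,
        PySem.List.length_pyRange_one]
    rfl
  · intro n h1 h2
    simp only [PySem.List.pySetD_of_nonneg _ _ hT0, List.getElem_set, List.getElem_map,
      PySem.List.getElem_pyRange_one, zero_add]
    have hn : n < 51 := by
      simpa [PySem.List.length_pySetD, List.length_replicate] using h1
    by_cases h : T.toNat = n
    · rw [if_pos h, if_pos (by omega : (n : Int) = T)]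
    · rw [if_neg h, if_neg (by omega : ¬ ((n : Int) = T))]
      rw [List.getElem_replicate]

lemma row0_le (T : Int) (hT0 : 0 ≤ T) (hT : T ≤ 50) (p : Int) (hp0 : 0 ≤ p) (hp : p < 51) :
    PySem.List.pyGetD (PySem.List.pySetD (List.replicate 51 pvINF) T 0) p pvINF ≤ pvINF := by
  rw [PySem.List.pySetD_of_nonneg _ _ hT0,
      PySem.List.pyGetD_eq_getElem _ _ hp0
        (by rw [List.length_set, List.length_replicate]; omega)]
  rw [List.getElem_set]
  by_cases h : T.toNat = p.toNat
  · rw [if_pos h]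
    norm_num [pvINF]
  · rw [if_neg h, List.getElem_replicate]

lemma rows_eq (onboard : List Int) (T t1 t2 a b : Int) (hT0 : 0 ≤ T) (hT : T ≤ 50) (m : Nat) :
    rowB onboard T t1 t2 a b m
      = ((PySem.List.pyRange 0 (m : Int) 1).foldl
          (fun cur i => stepA onboard T t1 t2 a b i cur)
          (PySem.List.pySetD (List.replicate 51 pvINF) T 0))
    ∧ ((PySem.List.pyRange 0 (m : Int) 1).foldl
          (fun cur i => stepA onboard T t1 t2 a b i cur)
          (PySem.List.pySetD (List.replicate 51 pvINF) T 0)).length = 51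
    ∧ (∀ k : Int, 0 ≤ k → k < 51 →
        PySem.List.pyGetD ((PySem.List.pyRange 0 (m : Int) 1).foldl
          (fun cur i => stepA onboard T t1 t2 a b i cur)
          (PySem.List.pySetD (List.replicate 51 pvINF) T 0)) k pvINF ≤ pvINF) := by
  induction m with
  | zero =>
      rw [show ((0 : Nat) : Int) = 0 from rfl]
      rw [PySem.List.pyRange_one_eq_nil (by omega : (0:Int) ≤ 0)]
      refine ⟨?_, ?_, ?_⟩
      · rw [List.foldl_nil]
        exact (row0_eq T hT0 hT).symm
      · rw [List.foldl_nil, PySem.List.length_pySetD, List.length_replicate]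
      · intro k hk0 hk
        rw [List.foldl_nil]
        exact row0_le T hT0 hT k hk0 hk
  | succ m ih =>
      obtain ⟨hEq, hLen, hLe⟩ := ih
      have hc : ((m + 1 : Nat) : Int) = (m : Int) + 1 := by push_cast; ring
      rw [hc]
      rw [PySem.List.pyRange_one_succ_right (by omega : (0:Int) ≤ (m : Int))]
      rw [List.foldl_append, List.foldl_cons, List.foldl_nil]
      refine ⟨?_, length_stepA _ _ _ _ _ _ _ _, ?_⟩
      · rw [rowB_succ, hEq]
        exact (step_eq onboard T t1 t2 a b (m : Int) _ hT0 hT hLen hLe).symm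
      · intro k hk0 hk
        exact stepA_le onboard T t1 t2 a b (m : Int) _ hT0 hT k hk0 hk


-- ===== VERDICT (by name: the statement is the Claim_ definition above) =====
theorem solution_spec : Claim_equal_solution := by
  intro temperature t1 t2 a b onboard _hdom hpre
  unfold Spec_solution solution solution_alt
  dsimp only
  obtain ⟨hne, hlo, hhi⟩ := hpre
  have hn : 1 ≤ (onboard.length : Int) := by
    have := List.length_pos_iff.mpr hne; omega
  have h := rows_eq onboard (temperature + 10) (t1 + 10) (t2 + 10) a b
    (by omega) (by omega) (onboard.length - 1)
  have hcast : (((onboard.length - 1 : Nat) : Int)) = (onboard.length : Int) - 1 := by omega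
  rw [hcast] at h
  rw [h.1]
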